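-- pv_equiv track=rewrite | github.com/surilp/data-structure-algorithm | python/array/valid_discount.py | _valid_discount
-- ===== SOURCE A (Python) =====
-- def _valid_discount(discount, start, end):
--     if end == start:
--         return False
--     if start > end:
--         return True
--     if discount[start] == discount[end]:
--         return _valid_discount(discount, start + 1, end - 1)
--     else:
--         mid = (start + end) // 2
--         if _valid_discount(discount, start, mid) and _valid_discount(discount, mid + 1, end):
--             return True
--         else:
--             return False
-- ===== SOURCE B (Python) =====
-- def _valid_discount(discount, start, end):
--     # Iterative version: explicit worklist of (start, end) intervals instead of recursion.
--     stack = [(start, end)]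
--     while stack:
--         s, e = stack.pop()
--         if e == s:
--             return False
--         if s > e:
--             continue
--         if discount[s] == discount[e]:
--             stack.append((s + 1, e - 1))
--         else:
--             mid = (s + e) // 2
--             stack.append((mid + 1, e))
--             stack.append((s, mid))
--     return True
-- ===== Notes on version B (the rewrite author's own statement) =====
-- stated objective: alternative
-- what changed: Replaces the recursive AND-tree with an iterative explicit stack of (start,end) intervals that returns False on the first single-element interval and True when the worklist empties.
import Mathlib
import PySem

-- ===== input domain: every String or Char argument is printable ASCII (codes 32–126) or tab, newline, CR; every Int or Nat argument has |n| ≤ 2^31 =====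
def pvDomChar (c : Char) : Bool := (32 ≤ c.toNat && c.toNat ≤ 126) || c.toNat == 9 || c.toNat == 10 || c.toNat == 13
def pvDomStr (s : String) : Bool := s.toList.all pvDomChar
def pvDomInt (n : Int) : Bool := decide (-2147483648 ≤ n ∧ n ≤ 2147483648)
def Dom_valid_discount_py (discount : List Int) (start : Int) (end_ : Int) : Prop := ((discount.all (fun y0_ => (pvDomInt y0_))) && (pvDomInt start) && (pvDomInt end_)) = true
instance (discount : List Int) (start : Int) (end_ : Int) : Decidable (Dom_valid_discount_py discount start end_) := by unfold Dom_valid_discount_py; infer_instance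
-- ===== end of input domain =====

-- B replaces A's recursion by an iterative explicit worklist of (start, end) intervals (same AND-tree, iterative control; no speed claim).

-- ===== PORT A =====
-- A's recursion, totalized by a fuel argument ((end-start).toNat + 1 bounds the depth)
def pvGoA (discount : List Int) : Nat → Int → Int → Bool
  | 0, _, _ => false
  | fuel + 1, start, end_ =>
    if end_ = start then false
    else if start > end_ then true
    else
      match PySem.List.pyGet? discount start, PySem.List.pyGet? discount end_ with
      | some a, some b =>
        if a = b then pvGoA discount fuel (start + 1) (end_ - 1)
        else
          if pvGoA discount fuel start (PySem.Int.floordiv (start + end_) 2)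
             && pvGoA discount fuel (PySem.Int.floordiv (start + end_) 2 + 1) end_
          then true else false
      | _, _ => false

def valid_discount_py (discount : List Int) (start : Int) (end_ : Int) : Bool :=
  pvGoA discount ((end_ - start).toNat + 1) start end_


-- ===== PORT B =====
-- Source B's while loop, totalized by fuel (each iteration pops the top interval)
def pvAltLoop (discount : List Int) : Nat → List (Int × Int) → Bool
  | 0, _ => false
  | fuel + 1, stack =>
    match stack with
    | [] => true
    | (s, e) :: rest =>
      if e = s then false
      else if s > e then pvAltLoop discount fuel rest
      else
        match PySem.List.pyGet? discount s, PySem.List.pyGet? discount e with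
        | some a, some b =>
          if a = b then pvAltLoop discount fuel ((s + 1, e - 1) :: rest)
          else
            pvAltLoop discount fuel
              ((s, PySem.Int.floordiv (s + e) 2) :: (PySem.Int.floordiv (s + e) 2 + 1, e) :: rest)
        | _, _ => false

def valid_discount_py_alt (discount : List Int) (start : Int) (end_ : Int) : Bool :=
  pvAltLoop discount (3 * (end_ - start).toNat + 3) [(start, end_)]


-- ===== PRECONDITION & SPEC =====
-- Pre_ excludes exactly the inputs on which Python's discount[start]/discount[end] raises IndexError
-- (start < end with start or end outside [-len, len)); B raises there too.
def Pre_valid_discount_py (discount : List Int) (start : Int) (end_ : Int) : Prop :=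
  end_ ≤ start ∨ (PySem.Raise.InRange discount.length start ∧ PySem.Raise.InRange discount.length end_)
instance (discount : List Int) (start : Int) (end_ : Int) : Decidable (Pre_valid_discount_py discount start end_) := by unfold Pre_valid_discount_py; infer_instance

def pvWitness_valid_discount_py : List Int × Int × Int := ([1, 2, 1], 0, 2)

def Spec_valid_discount_py (discount : List Int) (start : Int) (end_ : Int) (out : Bool) : Prop := out = valid_discount_py_alt discount start end_
instance (discount : List Int) (start : Int) (end_ : Int) (out : Bool) : Decidable (Spec_valid_discount_py discount start end_ out) := by unfold Spec_valid_discount_py; infer_instance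

-- ===== CLAIM (what is proved, stated in full; the proofs are below) =====
def Claim_equal_valid_discount_py : Prop := ∀ (discount : List Int) (start : Int) (end_ : Int), Dom_valid_discount_py discount start end_ → Pre_valid_discount_py discount start end_ → Spec_valid_discount_py discount start end_ (valid_discount_py discount start end_)

-- ===== LEMMAS AND PROOFS =====
theorem pvLe_mid {s e : Int} (h : s < e) : s ≤ PySem.Int.floordiv (s + e) 2 := by
  rw [PySem.Int.le_floordiv_iff_mul_le (by omega)]; omega

theorem pvMid_lt {s e : Int} (h : s < e) : PySem.Int.floordiv (s + e) 2 < e := by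
  rw [PySem.Int.floordiv_lt_iff_lt_mul (by omega)]; omega


-- fuel adequacy for A's recursion
theorem pvLA (d : List Int) : ∀ f1 f2 s e, (e - s).toNat < f1 → (e - s).toNat < f2 →
    pvGoA d f1 s e = pvGoA d f2 s e := by
  intro f1
  induction f1 with
  | zero => intro f2 s e h1 _; omega
  | succ f1 ih =>
    intro f2 s e h1 h2
    match f2, h2 with
    | f2 + 1, h2 =>
      simp only [pvGoA]
      by_cases hes : e = s
      · simp [hes]
      · simp only [hes, if_false]
        by_cases hse : s > e
        · simp [hse]
        · simp only [hse, if_false]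
          cases hga : PySem.List.pyGet? d s with
          | none => rfl
          | some a =>
            cases hgb : PySem.List.pyGet? d e with
            | none => rfl
            | some b =>
              by_cases hab : a = b
              · simp only [hab, if_true]
                exact ih f2 (s + 1) (e - 1) (by omega) (by omega)
              · simp only [hab, if_false]
                have hl := pvLe_mid (s := s) (e := e) (by omega)
                have hr := pvMid_lt (s := s) (e := e) (by omega)
                rw [ih f2 s (PySem.Int.floordiv (s + e) 2) (by omega) (by omega),
                    ih f2 (PySem.Int.floordiv (s + e) 2 + 1) e (by omega) (by omega)]

-- A's port satisfies the original recurrence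
theorem pvA_unfold (d : List Int) (s e : Int) :
    valid_discount_py d s e =
      (if e = s then false
       else if s > e then true
       else
         match PySem.List.pyGet? d s, PySem.List.pyGet? d e with
         | some a, some b =>
           if a = b then valid_discount_py d (s + 1) (e - 1)
           else
             if valid_discount_py d s (PySem.Int.floordiv (s + e) 2)
                && valid_discount_py d (PySem.Int.floordiv (s + e) 2 + 1) e
             then true else false
         | _, _ => false) := by
  conv_lhs => rw [show valid_discount_py d s e = pvGoA d ((e - s).toNat + 1) s e from rfl]
  simp only [pvGoA]
  by_cases hes : e = s
  · simp [hes]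
  · simp only [hes, if_false]
    by_cases hse : s > e
    · simp [hse]
    · simp only [hse, if_false]
      cases hga : PySem.List.pyGet? d s with
      | none => rfl
      | some a =>
        cases hgb : PySem.List.pyGet? d e with
        | none => rfl
        | some b =>
          by_cases hab : a = b
          · simp only [hab, if_true]
            exact pvLA d ((e - s).toNat) ((e - 1 - (s + 1)).toNat + 1) (s + 1) (e - 1) (by omega) (by omega)
          · simp only [hab, if_false]
            have hl := pvLe_mid (s := s) (e := e) (by omega)
            have hr := pvMid_lt (s := s) (e := e) (by omega)
            rw [pvLA d ((e - s).toNat) ((PySem.Int.floordiv (s + e) 2 - s).toNat + 1) s _ (by omega) (by omega),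
                pvLA d ((e - s).toNat) ((e - (PySem.Int.floordiv (s + e) 2 + 1)).toNat + 1) _ e (by omega) (by omega)]
            rfl

-- loop potential: every iteration of Source B's loop decreases it by at least one
def pvPot (p : Int × Int) : Nat := 3 * (p.2 - p.1).toNat + 2

-- the worklist computes the left-to-right AND of A's verdicts over the stacked intervals
theorem pvLB (d : List Int) : ∀ fuel stack, ((stack.map pvPot).sum) < fuel →
    pvAltLoop d fuel stack
      = stack.foldr (fun p acc => valid_discount_py d p.1 p.2 && acc) true := by
  intro fuel
  induction fuel with
  | zero => intro stack h; omega
  | succ fuel ih =>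
    intro stack h
    match stack with
    | [] => rfl
    | (s, e) :: rest =>
      simp only [List.map_cons, List.sum_cons, pvPot] at h
      simp only [pvAltLoop, List.foldr_cons]
      rw [pvA_unfold d s e]
      by_cases hes : e = s
      · simp [hes]
      · simp only [hes, if_false]
        by_cases hse : s > e
        · simp only [hse, if_true, Bool.true_and]
          exact ih rest (by omega)
        · simp only [hse, if_false]
          cases hga : PySem.List.pyGet? d s with
          | none => rfl
          | some a =>
            cases hgb : PySem.List.pyGet? d e with
            | none => rfl
            | some b =>
              by_cases hab : a = b
              · simp only [hab, if_true]
                rw [ih ((s + 1, e - 1) :: rest) (by simp only [List.map_cons, List.sum_cons, pvPot]; omega)]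
                simp
              · simp only [hab, if_false]
                have hl := pvLe_mid (s := s) (e := e) (by omega)
                have hr := pvMid_lt (s := s) (e := e) (by omega)
                rw [ih ((s, PySem.Int.floordiv (s + e) 2) :: (PySem.Int.floordiv (s + e) 2 + 1, e) :: rest)
                      (by simp only [List.map_cons, List.sum_cons, pvPot]; omega)]
                simp only [List.foldr_cons]
                cases hx : valid_discount_py d s (PySem.Int.floordiv (s + e) 2) <;>
                  cases hy : valid_discount_py d (PySem.Int.floordiv (s + e) 2 + 1) e <;> simp


-- ===== VERDICT (by name: the statement is the Claim_ definition above) =====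
theorem valid_discount_py_spec : Claim_equal_valid_discount_py := by
  intro discount start end_ _ _
  unfold Spec_valid_discount_py valid_discount_py_alt
  rw [pvLB discount (3 * (end_ - start).toNat + 3) [(start, end_)] (by simp [pvPot])]
  simp
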